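-- pv_equiv track=rewrite | github.com/AnarchoBooleanism/craftbook-lift-sign-macro | sign_generator.py | generate_sign
-- ===== SOURCE A (Python) =====
-- def get_floor_number(num:int) -> str:
--     """
--     Returns the floor number for a given integer.
--     Examples: Ground, 2nd, 3rd, 4th, etc.
--
--     Parameters:
--         num (int): Integer to analyze.
--     Returns:
--         floor_number (str): String representation of floor for the given integer.
--     """
--     assert type(num) is int, "get_ordinal_indicator: num must be an int"
--     assert num > 0, "get_ordinal_indicator: num must be a positive integer (starting from 1)"
--
--     if num == 1: # If ground floor (floor 1)
--         return "Ground"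
--
--     match ending := num % 10: # Special cases
--         case 1:
--             return f"{num}st"
--         case 2:
--             return f"{num}nd"
--         case 3:
--             return f"{num}rd"
--
--     return f"{num}th" # If not returned already, return "-th"
--
-- def generate_sign(count:int, has_basement:bool=False, has_rooftop:bool=False) -> list[str]:
--     """
--     Generator function for sign text. Returns a list of strings, representing lines.
--
--     Parameters:
--         count (int): Number of floors to create signs for, in between the basement and rooftop floors.
--         has_basement (bool): Whether to include a basement floor in the signs. (default: False)
--         has_rooftop (bool): Whether to include a rooftop in the signs. (default: False)
--     """
--     assert type(has_basement) is bool, f"generate_sign: has_basement must be a bool"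
--     assert type(has_rooftop) is bool, f"generate_sign: has_rooftop must be a bool"
--
--     if has_basement: # Yield for basement
--         yield ["Basement", "[Lift Up]"]
--
--     for floor in range(1, count + 1): # Yield per floor
--         floor_text = f"{get_floor_number(floor)} Floor"
--
--         if has_basement or floor != 1: # If not bottom floor or basement
--             yield [floor_text, "[Lift Down]"]
--         if has_rooftop or floor != count: # If not rooftop or top floor
--             yield [floor_text, "[Lift Up]"]
--
--     if has_rooftop: # Yield for rooftop
--         yield ["Rooftop", "[Lift Down]"]
-- ===== SOURCE B (Python) =====
-- def generate_sign(count, has_basement=False, has_rooftop=False):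
--     """Position-based re-implementation: build the ordered label list once,
--     then decide [Lift Down]/[Lift Up] purely from each label's position."""
--     assert type(has_basement) is bool, "generate_sign: has_basement must be a bool"
--     assert type(has_rooftop) is bool, "generate_sign: has_rooftop must be a bool"
--
--     labels = []
--     if has_basement:
--         labels.append("Basement")
--     labels.extend(f"{_floor_label(f)} Floor" for f in range(1, count + 1))
--     if has_rooftop:
--         labels.append("Rooftop")
--
--     n = len(labels)
--     for i, label in enumerate(labels):
--         if i > 0:
--             yield [label, "[Lift Down]"]
--         if i < n - 1:
--             yield [label, "[Lift Up]"]
--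
--
-- def _floor_label(num):
--     if num == 1:
--         return "Ground"
--     suffix = {1: "st", 2: "nd", 3: "rd"}.get(num % 10, "th")
--     return f"{num}{suffix}"
-- ===== Notes on version B (the rewrite author's own statement) =====
-- stated objective: simpler
-- what changed: B builds the ordered label list (Basement?, floors, Rooftop?) once and decides [Lift Down]/[Lift Up] uniformly from each label's position (i>0 / i<n-1), replacing A's separate basement/rooftop yields and per-floor 'has_basement or floor!=1' / 'has_rooftop or floor!=count' special cases.
-- intended difference: When count <= 0 and exactly one of has_basement/has_rooftop is set, A yields a single sign directing the lift up (Basement) or down (Rooftop) toward a floor that does not exist, while B yields nothing, which is the intended output since there is no floor to travel to. — e.g. on generate_sign(0, true, false): A returns [["Basement", "[Lift Up]"]], B returns []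
import Mathlib
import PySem

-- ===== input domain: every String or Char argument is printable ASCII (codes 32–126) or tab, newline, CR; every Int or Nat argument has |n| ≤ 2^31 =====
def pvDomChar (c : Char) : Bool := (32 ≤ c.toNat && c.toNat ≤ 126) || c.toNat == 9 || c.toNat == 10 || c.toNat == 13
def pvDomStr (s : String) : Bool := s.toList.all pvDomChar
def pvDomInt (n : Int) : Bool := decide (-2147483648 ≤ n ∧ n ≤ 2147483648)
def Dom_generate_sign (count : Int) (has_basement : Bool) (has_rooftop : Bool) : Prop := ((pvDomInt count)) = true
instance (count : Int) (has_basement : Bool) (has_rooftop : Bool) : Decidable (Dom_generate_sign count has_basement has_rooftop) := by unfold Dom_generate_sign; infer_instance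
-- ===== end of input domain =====

-- B replaces A's basement/rooftop special cases by one uniform position-based pass over a label list (objective: simpler).

-- ===== PORT A =====
def get_floor_number (num : Int) : String :=
  if num = 1 then "Ground"
  else
    let ending := PySem.Int.mod num 10
    if ending = 1 then PySem.Int.toStr num ++ "st"
    else if ending = 2 then PySem.Int.toStr num ++ "nd"
    else if ending = 3 then PySem.Int.toStr num ++ "rd"
    else PySem.Int.toStr num ++ "th"

def generate_sign (count : Int) (has_basement : Bool) (has_rooftop : Bool) : List (List String) :=
  (if has_basement then [["Basement", "[Lift Up]"]] else []) ++
  ((PySem.List.pyRange 1 (count + 1) 1).flatMap (fun floor =>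
    let floor_text := get_floor_number floor ++ " Floor"
    (if has_basement || floor ≠ 1 then [[floor_text, "[Lift Down]"]] else []) ++
    (if has_rooftop || floor ≠ count then [[floor_text, "[Lift Up]"]] else []))) ++
  (if has_rooftop then [["Rooftop", "[Lift Down]"]] else [])

-- ===== PORT B =====
def floor_label (num : Int) : String :=
  if num = 1 then "Ground"
  else
    let suffix := PySem.Dict.getD (PySem.Dict.ofList [((1:Int),"st"), (2,"nd"), (3,"rd")]) (PySem.Int.mod num 10) "th"
    PySem.Int.toStr num ++ suffix

def generate_sign_alt (count : Int) (has_basement : Bool) (has_rooftop : Bool) : List (List String) :=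
  let labels : List String :=
    (if has_basement then ["Basement"] else []) ++
    (PySem.List.pyRange 1 (count + 1) 1).map (fun f => floor_label f ++ " Floor") ++
    (if has_rooftop then ["Rooftop"] else [])
  let n : Int := labels.length
  (PySem.List.enumerate labels 0).flatMap (fun p =>
    (if p.1 > 0 then [[p.2, "[Lift Down]"]] else []) ++
    (if p.1 < n - 1 then [[p.2, "[Lift Up]"]] else []))

-- ===== PRECONDITION & SPEC =====
-- When count ≤ 0 and exactly one of has_basement/has_rooftop is set, A yields a single sign
-- directing the lift toward a floor that does not exist, while B yields nothing — the
-- intended output, since there is no floor to travel to.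
def D_generate_sign (count : Int) (has_basement : Bool) (has_rooftop : Bool) : Prop :=
  count ≤ 0 ∧ has_basement ≠ has_rooftop
instance (count : Int) (has_basement : Bool) (has_rooftop : Bool) : Decidable (D_generate_sign count has_basement has_rooftop) := by unfold D_generate_sign; infer_instance

def Spec_generate_sign (count : Int) (has_basement : Bool) (has_rooftop : Bool) (out : List (List String)) : Prop := ¬ D_generate_sign count has_basement has_rooftop → out = generate_sign_alt count has_basement has_rooftop
instance (count : Int) (has_basement : Bool) (has_rooftop : Bool) (out : List (List String)) : Decidable (Spec_generate_sign count has_basement has_rooftop out) := by unfold Spec_generate_sign; infer_instance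

def pvDiffWitness_generate_sign : Int × Bool × Bool := (0, true, false)
def pvDiffWitnessOut_generate_sign : (List (List String)) × (List (List String)) :=
  ([["Basement", "[Lift Up]"]], [])

-- ===== CLAIM (what is proved, stated in full; the proofs are below) =====
def Claim_unchanged_generate_sign : Prop := ∀ (count : Int) (has_basement : Bool) (has_rooftop : Bool), Dom_generate_sign count has_basement has_rooftop → Spec_generate_sign count has_basement has_rooftop (generate_sign count has_basement has_rooftop)
def Claim_changed_generate_sign : Prop := Dom_generate_sign (pvDiffWitness_generate_sign.1) (pvDiffWitness_generate_sign.2.1) (pvDiffWitness_generate_sign.2.2) ∧ D_generate_sign (pvDiffWitness_generate_sign.1) (pvDiffWitness_generate_sign.2.1) (pvDiffWitness_generate_sign.2.2) ∧ generate_sign (pvDiffWitness_generate_sign.1) (pvDiffWitness_generate_sign.2.1) (pvDiffWitness_generate_sign.2.2) = pvDiffWitnessOut_generate_sign.1 ∧ generate_sign_alt (pvDiffWitness_generate_sign.1) (pvDiffWitness_generate_sign.2.1) (pvDiffWitness_generate_sign.2.2) = pvDiffWitnessOut_generate_sign.2 ∧ pvDiffWitnessOut_generate_sign.1 ≠ 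pvDiffWitnessOut_generate_sign.2
def Claim_exact_generate_sign : Prop := ∀ (count : Int) (has_basement : Bool) (has_rooftop : Bool), Dom_generate_sign count has_basement has_rooftop → D_generate_sign count has_basement has_rooftop → generate_sign count has_basement has_rooftop ≠ generate_sign_alt count has_basement has_rooftop


-- ===== LEMMAS AND PROOFS =====

-- the output contributed by all labels AFTER the first one: each gets [Lift Down],
-- and [Lift Up] unless it is the last label
def pvCore2 : List String → List (List String)
  | [] => []
  | x :: rest =>
      [[x, "[Lift Down]"]] ++ (if rest.isEmpty then [] else [[x, "[Lift Up]"]]) ++ pvCore2 rest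

-- the position-based output for a whole label list
def pvCore : List String → List (List String)
  | [] => []
  | x :: rest => (if rest.isEmpty then [] else [[x, "[Lift Up]"]]) ++ pvCore2 rest

theorem pv_suffix_eq (e : Int) (h0 : 0 ≤ e) (hlt : e < 10) :
    PySem.Dict.getD (PySem.Dict.ofList [((1:Int),"st"), (2,"nd"), (3,"rd")]) e "th"
      = (if e = 1 then "st" else if e = 2 then "nd" else if e = 3 then "rd" else "th") := by
  interval_cases e <;> decide

theorem pv_floor_label_eq (num : Int) : floor_label num = get_floor_number num := by
  unfold floor_label get_floor_number
  by_cases h1 : num = 1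
  · simp [h1]
  · have h0 : 0 ≤ PySem.Int.mod num 10 := PySem.Int.mod_nonneg num (by norm_num)
    have hlt : PySem.Int.mod num 10 < 10 := PySem.Int.mod_lt num (by norm_num)
    simp only [h1, if_false, pv_suffix_eq (PySem.Int.mod num 10) h0 hlt]
    split_ifs <;> rfl

theorem pv_tail_enum (n : Int) (xs : List String) : ∀ (s : Int), 0 < s → s + xs.length = n →
    (PySem.List.enumerate xs s).flatMap (fun p =>
      (if p.1 > 0 then [[p.2, "[Lift Down]"]] else []) ++
      (if p.1 < n - 1 then [[p.2, "[Lift Up]"]] else [])) = pvCore2 xs := by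
  induction xs with
  | nil => intro s _ _; simp [PySem.List.enumerate_nil, pvCore2]
  | cons x rest ih =>
      intro s hs hn
      simp only [List.length_cons] at hn
      push_cast at hn
      rw [PySem.List.enumerate_cons, List.flatMap_cons, ih (s + 1) (by omega) (by omega)]
      have hd : ((s > 0) = True) := by simp; omega
      have hu : (s < n - 1) ↔ ¬ rest.isEmpty = true := by
        cases rest <;> simp_all <;> omega
      simp only [hd, if_true, pvCore2]
      by_cases he : rest.isEmpty <;> simp_all

theorem pv_core_flat (xs : List String) :
    (PySem.List.enumerate xs 0).flatMap (fun p =>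
      (if p.1 > 0 then [[p.2, "[Lift Down]"]] else []) ++
      (if p.1 < (xs.length : Int) - 1 then [[p.2, "[Lift Up]"]] else [])) = pvCore xs := by
  cases xs with
  | nil => simp [PySem.List.enumerate_nil, pvCore]
  | cons x rest =>
      rw [PySem.List.enumerate_cons, List.flatMap_cons,
        show (0:Int) + 1 = 1 by norm_num,
        pv_tail_enum ((List.length (x :: rest) : Nat) : Int) rest 1 (by omega)
          (by simp only [List.length_cons]; push_cast; omega)]
      have hu : ((0:Int) < ((List.length (x :: rest) : Nat) : Int) - 1) ↔ ¬ rest.isEmpty = true := by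
        cases rest <;> simp
      simp only [pvCore, show ¬ ((0:Int) > 0) by omega, if_false, List.nil_append]
      by_cases he : rest.isEmpty <;> simp_all

theorem pv_B_core (count : Int) (has_basement has_rooftop : Bool) :
    generate_sign_alt count has_basement has_rooftop = pvCore
      ((if has_basement then ["Basement"] else []) ++
       (PySem.List.pyRange 1 (count + 1) 1).map (fun f => floor_label f ++ " Floor") ++
       (if has_rooftop then ["Rooftop"] else [])) := by
  exact pv_core_flat _

theorem pvCore_cons (x : String) (xs : List String) (h : xs.isEmpty = false) :
    pvCore (x :: xs) = [x, "[Lift Up]"] :: pvCore2 xs := by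
  simp [pvCore, h]

theorem pv_tail_A (count : Int) (has_basement has_rooftop : Bool) : ∀ (m : Nat) (k : Int),
    1 ≤ k → k ≤ count → (count - k).toNat = m → (has_basement = true ∨ k ≠ 1) →
    ((PySem.List.pyRange k (count + 1) 1).flatMap (fun floor =>
      (if has_basement || floor ≠ 1 then [[get_floor_number floor ++ " Floor", "[Lift Down]"]] else []) ++
      (if has_rooftop || floor ≠ count then [[get_floor_number floor ++ " Floor", "[Lift Up]"]] else []))) ++
      (if has_rooftop then [["Rooftop", "[Lift Down]"]] else []) =
    pvCore2 ((PySem.List.pyRange k (count + 1) 1).map (fun f => floor_label f ++ " Floor") ++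
      (if has_rooftop then ["Rooftop"] else [])) := by
  intro m
  induction m with
  | zero =>
      intro k h1 hk hm hne
      have hkc : k = count := by omega
      subst hkc
      rw [PySem.List.pyRange_one_singleton, List.flatMap_singleton, List.map_singleton]
      rcases hne with h | h <;> cases has_rooftop <;>
        simp [pvCore2, pv_floor_label_eq, h]
  | succ m ih =>
      intro k h1 hk hm hne
      rw [PySem.List.pyRange_one_cons (by omega : k < count + 1), List.flatMap_cons, List.map_cons]
      rw [List.append_assoc, ih (k + 1) (by omega) (by omega) (by omega) (Or.inr (by omega))]
      have hku : ¬ k = count := by omega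
      have hne3 : ¬ (PySem.List.pyRange (k + 1) (count + 1) 1 = []) := by
        rw [PySem.List.pyRange_one_cons (by omega : k + 1 < count + 1)]; simp
      rcases hne with h | h <;>
        simp [pvCore2, pv_floor_label_eq, h, hku, hne3]

theorem generate_sign_main : ∀ (count : Int) (has_basement : Bool) (has_rooftop : Bool),
    ¬ D_generate_sign count has_basement has_rooftop →
    generate_sign count has_basement has_rooftop = generate_sign_alt count has_basement has_rooftop := by
  intro count hb hr hD
  rw [pv_B_core]
  unfold generate_sign
  by_cases hc : count ≤ 0
  · have hbr : hb = hr := by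
      unfold D_generate_sign at hD
      by_contra h; exact hD ⟨hc, h⟩
    rw [PySem.List.pyRange_one_eq_nil (by omega)]
    subst hbr
    cases hb <;> simp [pvCore, pvCore2]
  · have h1 : 1 ≤ count := by omega
    cases hb with
    | true =>
        have hT := pv_tail_A count true hr (count - 1).toNat 1 (by omega) h1 (by omega) (Or.inl rfl)
        have hne2 : ((PySem.List.pyRange 1 (count + 1) 1).map (fun f => floor_label f ++ " Floor") ++
            (if hr then ["Rooftop"] else [])).isEmpty = false := by
          rw [PySem.List.pyRange_one_cons (by omega : (1:Int) < count + 1)]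
          simp
        simp only [if_true, List.nil_append, List.cons_append]
        rw [pvCore_cons _ _ hne2, hT]
    | false =>
        simp only [Bool.false_eq_true, if_false, List.nil_append]
        rw [PySem.List.pyRange_one_cons (by omega : (1:Int) < count + 1), List.flatMap_cons, List.map_cons]
        by_cases hc2 : count = 1
        · subst hc2
          rw [PySem.List.pyRange_one_eq_nil (by omega : (1:Int) + 1 ≤ 1 + 1)]
          cases hr <;> simp [pvCore, pvCore2, pv_floor_label_eq]
        · have hT := pv_tail_A count false hr (count - 2).toNat 2 (by omega) (by omega) (by omega)
            (Or.inr (by omega))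
          have hne2 : ((PySem.List.pyRange (1 + 1) (count + 1) 1).map (fun f => floor_label f ++ " Floor") ++
              (if hr then ["Rooftop"] else [])).isEmpty = false := by
            rw [PySem.List.pyRange_one_cons (by omega : (1:Int) + 1 < count + 1)]
            simp
          have hc1 : ¬ (1:Int) = count := by omega
          have hne3 : ¬ (PySem.List.pyRange (2:Int) (count + 1) 1 = []) := by
            rw [PySem.List.pyRange_one_cons (by omega : (2:Int) < count + 1)]; simp
          simp only [show (1:Int) + 1 = 2 from rfl]
          simp [pv_floor_label_eq] at hT
          simp [pvCore, pv_floor_label_eq, hc1, hne3, hT]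

-- ===== VERDICT (by name: the statement is the Claim_ definition above) =====
theorem generate_sign_spec : Claim_unchanged_generate_sign := by
  intro c hb hr _ hD
  exact generate_sign_main c hb hr hD

theorem generate_sign_changed : Claim_changed_generate_sign := by
  unfold Claim_changed_generate_sign; decide

theorem generate_sign_tight : Claim_exact_generate_sign := by
  intro count hb hr _ hD
  unfold D_generate_sign at hD
  obtain ⟨hc, hne⟩ := hD
  rw [pv_B_core]
  unfold generate_sign
  rw [PySem.List.pyRange_one_eq_nil (by omega)]
  cases hb <;> cases hr <;> simp_all [pvCore, pvCore2]
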